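-- pv_equiv track=rewrite | github.com/Herb-AI/HerbConstraintTranslator.jl | src/pyprogtree/pyprogtree/constraints/enforce_leftright_ordered.py | make_helpers
-- ===== SOURCE A (Python) =====
-- def make_helpers(sequence):
--     transitions = [sequence[0]]
--     repetitions = []
--     last = sequence[0]
--     count = 0
--
--     for i in sequence:
--         if i != last:
--             repetitions.append(count)
--             count = 1
--             transitions.append(i)
--             last = i
--         else:
--             count += 1
--     repetitions.append(count)
--     return repetitions, transitions
-- ===== SOURCE B (Python) =====
-- def make_helpers(sequence):
--     repetitions = []
--     transitions = []
--     i = 0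
--     n = len(sequence)
--     while i < n:
--         j = i + 1
--         while j < n and sequence[j] == sequence[i]:
--             j += 1
--         transitions.append(sequence[i])
--         repetitions.append(j - i)
--         i = j
--     return repetitions, transitions
-- ===== Notes on version B (the rewrite author's own statement) =====
-- stated objective: alternative
-- what changed: Replaces A's element-by-element state machine (last/count carried across the loop, with a post-loop flush) by a two-pointer span scan that finds each run's end index and emits its length and value in one step, with no trailing flush.
import Mathlib
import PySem

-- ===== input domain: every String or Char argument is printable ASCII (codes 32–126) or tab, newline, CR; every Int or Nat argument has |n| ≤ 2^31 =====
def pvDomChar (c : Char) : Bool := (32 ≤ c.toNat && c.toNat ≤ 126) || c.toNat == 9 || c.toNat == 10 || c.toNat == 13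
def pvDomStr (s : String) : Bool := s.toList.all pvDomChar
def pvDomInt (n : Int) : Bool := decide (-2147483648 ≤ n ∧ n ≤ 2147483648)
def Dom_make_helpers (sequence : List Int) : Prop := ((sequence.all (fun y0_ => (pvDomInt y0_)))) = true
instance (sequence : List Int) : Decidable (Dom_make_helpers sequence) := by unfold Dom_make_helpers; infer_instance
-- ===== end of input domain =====

-- B replaces A's last/count state machine (with post-loop flush) by a two-pointer run-span
-- scan emitting each run in one step; same O(n) cost, different decomposition (objective: alternative).

-- ===== PORT A =====
-- fold state: (transitions, repetitions, last, count), exactly A's loop variables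
def make_helpers (sequence : List Int) : List Int × List Int :=
  match PySem.List.pyGet? sequence 0 with
  | none => ([], [])  -- unreachable under Pre_make_helpers (Python raises IndexError here)
  | some h =>
    let st := sequence.foldl
      (fun (s : List Int × List Int × Int × Int) (i : Int) =>
        if i ≠ s.2.2.1 then (s.1 ++ [i], s.2.1 ++ [s.2.2.2], i, 1)
        else (s.1, s.2.1, s.2.2.1, s.2.2.2 + 1))
      ([h], [], h, 0)
    (st.2.1 ++ [st.2.2.2], st.1)

-- ===== PORT B =====
-- the inner `while j < n and sequence[j] == sequence[i]` is the run span after position i;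
-- the fuel argument (= outer-loop bound, the list length) only makes the recursion structural
def make_helpers_alt_go : Nat → List Int → List Int × List Int
  | _, [] => ([], [])
  | 0, _ :: _ => ([], [])   -- unreachable: fuel ≥ length of the list
  | f + 1, x :: xs =>
    let run := xs.takeWhile (fun y => y == x)       -- elements scanned by the inner while
    let rest := xs.dropWhile (fun y => y == x)
    let p := make_helpers_alt_go f rest
    ((1 + (run.length : Int)) :: p.1, x :: p.2)

def make_helpers_alt (sequence : List Int) : List Int × List Int :=
  make_helpers_alt_go sequence.length sequence

-- ===== PRECONDITION & SPEC =====
-- Pre_ excludes only the empty list, where Python A raises IndexError reading the first element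
def Pre_make_helpers (sequence : List Int) : Prop := sequence ≠ []
instance (sequence : List Int) : Decidable (Pre_make_helpers sequence) := by unfold Pre_make_helpers; infer_instance
def pvWitness_make_helpers : List Int := [2, 2, 5]

def Spec_make_helpers (sequence : List Int) (out : List Int × List Int) : Prop := out = make_helpers_alt sequence
instance (sequence : List Int) (out : List Int × List Int) : Decidable (Spec_make_helpers sequence out) := by unfold Spec_make_helpers; infer_instance

-- ===== CLAIM (what is proved, stated in full; the proofs are below) =====
def Claim_equal_make_helpers : Prop := ∀ (sequence : List Int), Dom_make_helpers sequence → Pre_make_helpers sequence → Spec_make_helpers sequence (make_helpers sequence)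

-- ===== LEMMAS AND PROOFS =====

-- proof-only model of A's remaining loop: current run value `last`, its count so far, rest of input
def pvConsume (last count : Int) : List Int → List Int × List Int
  | [] => ([count], [])
  | x :: xs =>
    if x ≠ last then
      let p := pvConsume x 1 xs
      (count :: p.1, x :: p.2)
    else pvConsume last (count + 1) xs

def pvStep (s : List Int × List Int × Int × Int) (i : Int) : List Int × List Int × Int × Int :=
  if i ≠ s.2.2.1 then (s.1 ++ [i], s.2.1 ++ [s.2.2.2], i, 1)
  else (s.1, s.2.1, s.2.2.1, s.2.2.2 + 1)

theorem pvFold_eq_consume (l : List Int) : ∀ (trans reps : List Int) (last count : Int),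
    (let st := l.foldl pvStep (trans, reps, last, count)
     (st.2.1 ++ [st.2.2.2], st.1))
    = (reps ++ (pvConsume last count l).1, trans ++ (pvConsume last count l).2) := by
  induction l with
  | nil => intro trans reps last count; simp [pvConsume]
  | cons x xs ih =>
    intro trans reps last count
    by_cases hx : x = last
    · have hp : pvStep (trans, reps, last, count) x = (trans, reps, last, count + 1) := by
        simp [pvStep, hx]
      simp only [List.foldl_cons, hp]
      have := ih trans reps last (count + 1)
      simp only at this
      simp [this, pvConsume, hx]
    · have hp : pvStep (trans, reps, last, count) x = (trans ++ [x], reps ++ [count], x, 1) := by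
        simp [pvStep, hx]
      simp only [List.foldl_cons, hp]
      have := ih (trans ++ [x]) (reps ++ [count]) x 1
      simp only at this
      simp [this, pvConsume, hx]

theorem pvConsume_eq_go (l : List Int) : ∀ (last count : Int) (f : Nat), l.length ≤ f →
    pvConsume last count l
    = ((count + (((l.takeWhile (fun y => y == last)).length : Int)))
          :: (make_helpers_alt_go f (l.dropWhile (fun y => y == last))).1,
       (make_helpers_alt_go f (l.dropWhile (fun y => y == last))).2) := by
  induction l with
  | nil =>
    intro last count f _
    cases f <;> simp [pvConsume, make_helpers_alt_go]
  | cons x xs ih =>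
    intro last count f hf
    by_cases hx : x = last
    · subst hx
      have hxs : xs.length ≤ f := by simp at hf; omega
      have hcon : pvConsume x count (x :: xs) = pvConsume x (count + 1) xs := by
        simp [pvConsume]
      rw [hcon, ih x (count + 1) f hxs]
      simp only [List.takeWhile_cons, List.dropWhile_cons, beq_self_eq_true, if_true,
        List.length_cons, Prod.mk.injEq, List.cons.injEq, and_true]
      push_cast; ring
    · have hbx : (x == last) = false := by simp [hx]
      obtain ⟨f', rfl⟩ : ∃ f', f = f' + 1 := by
        cases f with
        | zero => simp at hf
        | succ n => exact ⟨n, rfl⟩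
      have hxs : xs.length ≤ f' := by simp at hf; omega
      simp only [pvConsume, List.takeWhile_cons, List.dropWhile_cons, hbx, if_pos hx, ne_eq,
        ite_false, Bool.false_eq_true]
      show _ = ((count + ((0 : Nat) : Int)) :: (make_helpers_alt_go (f' + 1) (x :: xs)).1,
        (make_helpers_alt_go (f' + 1) (x :: xs)).2)
      simp only [make_helpers_alt_go]
      rw [ih x 1 f' hxs]
      simp

-- ===== VERDICT (by name: the statement is the Claim_ definition above) =====
theorem make_helpers_spec : Claim_equal_make_helpers := by
  intro sequence _ hpre
  unfold Spec_make_helpers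
  match sequence, hpre with
  | h :: t, _ =>
    show make_helpers (h :: t) = make_helpers_alt (h :: t)
    have hstep : (fun (s : List Int × List Int × Int × Int) (i : Int) =>
        if i ≠ s.2.2.1 then (s.1 ++ [i], s.2.1 ++ [s.2.2.2], i, 1)
        else (s.1, s.2.1, s.2.2.1, s.2.2.2 + 1)) = pvStep := by
      funext s i; rfl
    have h1 : pvStep ([h], [], h, 0) h = ([h], [], h, 1) := by simp [pvStep]
    have hfold := pvFold_eq_consume t [h] [] h 1
    simp only at hfold
    unfold make_helpers make_helpers_alt
    simp only [PySem.List.pyGet?_zero_cons, hstep, List.foldl_cons, h1, List.length_cons,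
      make_helpers_alt_go]  -- first iteration: i = h = last, so count becomes 1
    simp only [hfold, pvConsume_eq_go t h 1 t.length (le_refl _)]
    simp
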